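-- pv_equiv track=rewrite | github.com/PauloCesar-dev404/Udemy-Download | src/utils_/utils.py | parser_captions
-- ===== SOURCE A (Python) =====
-- def parser_captions(captions_data: list) -> str:
--     """
--     Recebe uma lista de dicionários contendo dados de legendas e retorna uma
--     string com os códigos de idioma ('locale') de cada legenda, separados por vírgula.
--
--     Se o valor de 'locale' contiver um colchete '[', apenas a parte anterior a ele será considerada.
--     Além disso, a cada 4 itens, é inserida uma quebra de linha.
--
--     Args:
--         captions_data (list): Lista de dicionários com dados de legendas.
--
--     Returns:
--         str: String com os códigos de idioma separados por vírgula e com quebras de linha a cada 4 itens.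
--     """
--     locales = []
--     for entry in captions_data:
--         # Converte o valor para string, remove espaços extras e divide a string no primeiro '['
--         locale_str = str(entry.get('locale', '')).split('[', 1)[0].strip()
--         if locale_str:
--             locales.append(locale_str)
--
--     # Divide a lista de locais em blocos de 4 e junta cada bloco com vírgulas,
--     # inserindo uma quebra de linha entre os blocos.
--     lines = []
--     for i in range(0, len(locales), 4):
--         group = locales[i:i + 4]
--         lines.append(", ".join(group))
--
--     return "\n".join(lines)
-- ===== SOURCE B (Python) =====
-- def parser_captions(captions_data: list) -> str:
--     """Single pass: emit each locale with its separator chosen by the count of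
--     locales already emitted (newline every 4th), no grouping/slicing phase."""
--     parts = []
--     n = 0
--     for entry in captions_data:
--         locale_str = str(entry.get('locale', '')).split('[', 1)[0].strip()
--         if not locale_str:
--             continue
--         if n:
--             parts.append("\n" if n % 4 == 0 else ", ")
--         parts.append(locale_str)
--         n += 1
--     return "".join(parts)
-- ===== Notes on version B (the rewrite author's own statement) =====
-- stated objective: simpler
-- what changed: Replaced the two-phase collect-then-group/slice/join construction with a single pass that emits each kept locale preceded by a separator chosen from the running count (newline when the count is a positive multiple of 4).
import Mathlib
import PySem

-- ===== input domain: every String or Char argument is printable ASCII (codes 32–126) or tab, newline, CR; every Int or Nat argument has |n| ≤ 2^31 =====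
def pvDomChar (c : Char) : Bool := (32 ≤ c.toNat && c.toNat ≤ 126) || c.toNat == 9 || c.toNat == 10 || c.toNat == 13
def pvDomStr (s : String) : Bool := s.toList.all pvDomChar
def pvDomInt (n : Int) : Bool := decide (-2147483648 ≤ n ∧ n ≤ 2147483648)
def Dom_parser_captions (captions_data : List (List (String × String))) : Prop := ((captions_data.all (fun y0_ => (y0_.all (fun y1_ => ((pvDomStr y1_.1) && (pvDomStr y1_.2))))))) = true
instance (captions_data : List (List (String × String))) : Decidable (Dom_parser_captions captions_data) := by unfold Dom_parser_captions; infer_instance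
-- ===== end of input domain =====

-- B replaces A's collect-then-group/slice/join phases by a single pass that picks each
-- separator from a running count of kept locales (objective: simpler).

-- ===== PORT A =====
-- shared by both ports: str(entry.get('locale','')).split('[',1)[0].strip()
-- (the value is already a string; split('[',1) is never empty, so the [0] default is unreachable)
def pcLocale (entry : List (String × String)) : String :=
  PySem.Str.strip (PySem.List.pyGetD
    ((PySem.Str.splitMax? ((PySem.Dict.mk entry).getD "locale" "") "[" 1).getD []) 0 "")

def parser_captions (captions_data : List (List (String × String))) : String :=
  let locales := captions_data.foldl
    (fun acc entry =>
      if pcLocale entry ≠ "" then acc ++ [pcLocale entry] else acc) []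
  let lines := (PySem.List.pyRange 0 (locales.length : Int) 4).foldl
    (fun acc i => acc ++ [PySem.Str.join ", " (PySem.List.slice locales (some i) (some (i + 4)))]) []
  PySem.Str.join "\n" lines

-- ===== PORT B =====
def parser_captions_alt (captions_data : List (List (String × String))) : String :=
  let st := captions_data.foldl
    (fun (st : List String × Nat) entry =>
      if pcLocale entry = "" then st
      else (((if st.2 ≠ 0 then st.1 ++ [if st.2 % 4 = 0 then "\n" else ", "] else st.1) ++ [pcLocale entry]),
            st.2 + 1)) ([], 0)
  PySem.Str.join "" st.1

-- ===== PRECONDITION & SPEC =====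
def Spec_parser_captions (captions_data : List (List (String × String))) (out : String) : Prop := out = parser_captions_alt captions_data
instance (captions_data : List (List (String × String))) (out : String) : Decidable (Spec_parser_captions captions_data out) := by unfold Spec_parser_captions; infer_instance

-- ===== CLAIM (what is proved, stated in full; the proofs are below) =====
def Claim_equal_parser_captions : Prop := ∀ (captions_data : List (List (String × String))), Dom_parser_captions captions_data → Spec_parser_captions captions_data (parser_captions captions_data)

-- ===== LEMMAS AND PROOFS =====

-- the kept locales, in order
def pvLocs : List (List (String × String)) → List String
  | [] => []
  | e :: cd => if pcLocale e ≠ "" then pcLocale e :: pvLocs cd else pvLocs cd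

-- B's loop body, as a named step function on the kept locales
def pvLStep (st : List String × Nat) (s : String) : List String × Nat :=
  ((if st.2 ≠ 0 then st.1 ++ [if st.2 % 4 = 0 then "\n" else ", "] else st.1) ++ [s], st.2 + 1)

-- the rendering of the remaining locales when n locales were already emitted
def pvRender : Nat → List (List Char) → List Char
  | _, [] => []
  | n, s :: rest =>
      (if n = 0 then [] else if n % 4 = 0 then ['\n'] else [',', ' ']) ++ s ++ pvRender (n + 1) rest

-- A's line list as a function of the locale list
def pvLines (ls : List String) : List String :=
  (PySem.List.pyRange 0 (ls.length : Int) 4).map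
    (fun i => PySem.Str.join ", " (PySem.List.slice ls (some i) (some (i + 4))))

theorem pvJoinEmpty : ∀ l : List (List Char), PySem.Chars.join [] l = l.flatten
  | [] => PySem.Chars.join_nil []
  | [a] => by simp [PySem.Chars.join_singleton]
  | a :: b :: r => by
      rw [PySem.Chars.join_cons_cons, pvJoinEmpty (b :: r)]; simp

theorem pvLocales_eq (cd : List (List (String × String))) (acc : List String) :
    cd.foldl (fun acc entry =>
      if pcLocale entry ≠ "" then acc ++ [pcLocale entry] else acc) acc = acc ++ pvLocs cd := by
  induction cd generalizing acc with
  | nil => simp [pvLocs]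
  | cons e cd ih =>
      rw [List.foldl_cons, ih, pvLocs]
      split_ifs with h <;> simp_all

theorem pvB_locs (cd : List (List (String × String))) (st : List String × Nat) :
    cd.foldl (fun (st : List String × Nat) entry =>
      if pcLocale entry = "" then st
      else (((if st.2 ≠ 0 then st.1 ++ [if st.2 % 4 = 0 then "\n" else ", "] else st.1) ++ [pcLocale entry]),
            st.2 + 1)) st
    = (pvLocs cd).foldl pvLStep st := by
  induction cd generalizing st with
  | nil => simp [pvLocs]
  | cons e cd ih =>
      rw [List.foldl_cons, ih]
      by_cases h : pcLocale e = ""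
      · rw [if_pos h]
        have he : pvLocs (e :: cd) = pvLocs cd := by
          rw [pvLocs, if_neg (by simpa using h)]
        rw [he]
      · rw [if_neg h]
        have he : pvLocs (e :: cd) = pcLocale e :: pvLocs cd := by
          rw [pvLocs, if_pos h]
        rw [he, List.foldl_cons]
        rfl

theorem pvRender_shift (xs : List (List Char)) : ∀ n : Nat, 1 ≤ n → pvRender (n + 4) xs = pvRender n xs := by
  induction xs with
  | nil => intro n _; rfl
  | cons s rest ih =>
      intro n hn
      show pvRender (n + 4) (s :: rest) = pvRender n (s :: rest)
      simp only [pvRender, Nat.add_mod_right]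
      have h0 : ¬ (n + 4 = 0) := by omega
      have h1 : ¬ (n = 0) := by omega
      rw [if_neg h0, if_neg h1]
      have := ih (n + 1) (by omega)
      rw [show n + 4 + 1 = n + 1 + 4 by omega, this]

theorem pvRender_append (as bs : List (List Char)) : ∀ n : Nat,
    pvRender n (as ++ bs) = pvRender n as ++ pvRender (n + as.length) bs := by
  induction as with
  | nil => intro n; simp [pvRender]
  | cons a as ih =>
      intro n
      simp only [List.cons_append, pvRender, ih (n + 1), List.length_cons]
      rw [show n + 1 + as.length = n + (as.length + 1) by omega]
      simp

theorem pvRender_four (bs : List (List Char)) (h : bs ≠ []) :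
    pvRender 4 bs = '\n' :: pvRender 0 bs := by
  obtain ⟨x, xs, rfl⟩ := List.exists_cons_of_ne_nil h
  simp only [pvRender]
  norm_num
  rw [show (5 : Nat) = 1 + 4 by omega, pvRender_shift xs 1 (by omega)]

theorem pvRender_small (as : List (List Char)) (h : as.length ≤ 4) :
    pvRender 0 as = PySem.Chars.join [',', ' '] as := by
  match as with
  | [] => rfl
  | [a] => simp [pvRender, PySem.Chars.join_singleton]
  | [a, b] => simp [pvRender, PySem.Chars.join_cons_cons, PySem.Chars.join_singleton]
  | [a, b, c] => simp [pvRender, PySem.Chars.join_cons_cons, PySem.Chars.join_singleton]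
  | [a, b, c, d] => simp [pvRender, PySem.Chars.join_cons_cons, PySem.Chars.join_singleton]
  | a :: b :: c :: d :: e :: r => simp at h; omega

-- step-4 range unrolls one index
theorem pvRange4 (b : Int) (hb : 0 < b) :
    PySem.List.pyRange 0 b 4 = 0 :: (PySem.List.pyRange 0 (b - 4) 4).map (· + 4) := by
  rw [PySem.List.pyRange_of_pos 0 b (by norm_num : (0:Int) < 4),
      PySem.List.pyRange_of_pos 0 (b - 4) (by norm_num : (0:Int) < 4)]
  have hc : ((b - 0 + 4 - 1) / 4).toNat
      = (if 0 < b - 4 then ((b - 4 - 0 + 4 - 1) / 4).toNat else 0) + 1 := by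
    split_ifs with h <;> omega
  rw [if_pos hb, hc, List.range_succ_eq_map]
  simp only [List.map_cons, List.map_map, Nat.cast_zero, mul_zero, add_zero]
  congr 1

theorem pvSlice_take (ls : List String) : PySem.List.slice ls (some 0) (some (0 + 4)) = ls.take 4 := by
  rw [PySem.List.slice_toNat ls (by norm_num) (by norm_num)]; rfl

theorem pvSlice_shift (ls : List String) (i : Int) (hi : 0 ≤ i) :
    PySem.List.slice ls (some (i + 4)) (some (i + 4 + 4))
      = PySem.List.slice (ls.drop 4) (some i) (some (i + 4)) := by
  rw [PySem.List.slice_toNat ls (by omega) (by omega),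
      PySem.List.slice_toNat (ls.drop 4) (by omega) (by omega)]
  rw [List.drop_drop]
  congr 1
  · omega
  · congr 1
    omega

theorem pvLines_cons (ls : List String) (h : ls ≠ []) :
    pvLines ls = PySem.Str.join ", " (ls.take 4) :: pvLines (ls.drop 4) := by
  have hlen : 0 < (ls.length : Int) := by
    have := List.length_pos_of_ne_nil h; omega
  have hd : (ls.drop 4).length = ls.length - 4 := by simp
  unfold pvLines
  rw [pvRange4 _ hlen, List.map_cons, pvSlice_take, List.map_map]
  congr 1
  by_cases h4 : (ls.length : Int) ≤ 4
  · have e1 : PySem.List.pyRange 0 ((ls.length : Int) - 4) 4 = [] := by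
      rw [PySem.List.pyRange_of_pos _ _ (by norm_num : (0:Int) < 4), if_neg (by omega)]; rfl
    have e2 : PySem.List.pyRange 0 (((ls.drop 4).length : Int)) 4 = [] := by
      rw [PySem.List.pyRange_of_pos _ _ (by norm_num : (0:Int) < 4), if_neg (by omega)]; rfl
    rw [e1, e2]
    rfl
  · have e : (((ls.drop 4).length : Int)) = (ls.length : Int) - 4 := by omega
    rw [e]
    apply List.map_congr_left
    intro i hi
    have h0i : 0 ≤ i := by
      obtain ⟨h1, -, -⟩ := ((PySem.List.mem_pyRange_iff_of_pos
        (show (0:Int) < 4 by norm_num) i).mp hi)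
      omega
    simp only [Function.comp_apply]
    rw [pvSlice_shift ls i h0i]

theorem pvLines_ne_nil (ls : List String) (h : ls ≠ []) : pvLines ls ≠ [] := by
  rw [pvLines_cons ls h]; simp

theorem pvA_render (ls : List String) :
    (PySem.Str.join "\n" (pvLines ls)).toList = pvRender 0 (ls.map String.toList) := by
  by_cases h : ls = []
  · subst h
    simp [pvLines, PySem.List.pyRange_of_pos 0 0 (by norm_num : (0:Int) < 4),
      PySem.Str.toList_join, PySem.Chars.join_nil, pvRender]
  · rw [pvLines_cons ls h]
    by_cases h4 : ls.drop 4 = []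
    · have hlen : ls.length ≤ 4 := by
        have := congrArg List.length h4
        simp at this
        omega
      have htake : ls.take 4 = ls := List.take_of_length_le hlen
      rw [htake, show pvLines (ls.drop 4) = [] from by rw [h4]; rfl]
      rw [PySem.Str.toList_join, List.map_singleton, PySem.Chars.join_singleton,
          PySem.Str.toList_join]
      rw [pvRender_small (ls.map String.toList) (by simpa using hlen)]
      rfl
    · have hm : 4 < ls.length := by
        by_contra hc
        exact h4 (List.drop_eq_nil_of_le (by omega))
      obtain ⟨t, ts, ht⟩ := List.exists_cons_of_ne_nil (pvLines_ne_nil _ h4)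
      have ih := pvA_render (ls.drop 4)
      rw [ht] at ih ⊢
      rw [PySem.Str.toList_join, List.map_cons, List.map_cons, PySem.Chars.join_cons_cons,
          ← List.map_cons, ← PySem.Str.toList_join, ih]
      have hsplit : ls.map String.toList = (ls.take 4).map String.toList ++ (ls.drop 4).map String.toList := by
        rw [← List.map_append, List.take_append_drop]
      rw [hsplit, pvRender_append, pvRender_small ((ls.take 4).map String.toList)
            (by simp)]
      have hlen4 : ((ls.take 4).map String.toList).length = 4 := by simp; omega
      rw [hlen4, pvRender_four _ (by simp; omega)]
      rw [PySem.Str.toList_join]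
      simp
termination_by ls.length
decreasing_by simp; omega

theorem pvB_render (ls : List String) : ∀ st : List String × Nat,
    (((ls.foldl pvLStep st).1).map String.toList).flatten
      = ((st.1.map String.toList).flatten) ++ pvRender st.2 (ls.map String.toList) := by
  induction ls with
  | nil => intro st; simp [pvRender]
  | cons s rest ih =>
      intro st
      rw [List.foldl_cons, ih]
      simp only [List.map_cons, pvRender, pvLStep]
      by_cases h0 : st.2 = 0
      · simp [h0]
      · by_cases hm : st.2 % 4 = 0 <;> simp [h0, hm]

-- ===== VERDICT (by name: the statement is the Claim_ definition above) =====
theorem parser_captions_spec : Claim_equal_parser_captions := by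
  intro cd _
  unfold Spec_parser_captions parser_captions parser_captions_alt
  apply String.toList_inj.mp
  simp only []
  rw [pvLocales_eq cd [], List.nil_append,
      PySem.List.foldl_append_singleton_eq_map
        (fun i => PySem.Str.join ", " (PySem.List.slice (pvLocs cd) (some i) (some (i + 4)))),
      List.nil_append, pvB_locs cd ([], 0)]
  have hA := pvA_render (pvLocs cd)
  unfold pvLines at hA
  rw [hA, PySem.Str.toList_join, show ("" : String).toList = [] from rfl, pvJoinEmpty,
      pvB_render (pvLocs cd) ([], 0)]
  rfl
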